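-- pv_equiv track=rewrite | github.com/NandhiniRengan1-GEP/log-maintenance-automation | automation-system/llm1-diagnostics/app.py | extract_source_location
-- ===== SOURCE A (Python) =====
-- def extract_source_location(stack_trace):
--     """Extract file and line number from stack trace"""
--     if not stack_trace:
--         return None, None
--
--     # Parse stack trace to find source file
--     lines = stack_trace.split('\n')
--     for line in lines:
--         if '/app/src/' in line or 'src/' in line:
--             # Extract file path and line number
--             # Example: "at /app/src/api/users.js:11:51"
--             parts = line.strip().split()
--             for part in parts:
--                 if '.js:' in part or '.ts:' in part:
--                     file_and_line = part.strip('()')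
--                     if ':' in file_and_line:
--                         file_path = file_and_line.split(':')[0]
--                         line_num = file_and_line.split(':')[1] if len(file_and_line.split(':')) > 1 else None
--                         # Clean up file path
--                         if '/app/' in file_path:
--                             file_path = file_path.split('/app/')[-1]
--                         return file_path, line_num
--     return None, None
-- ===== SOURCE B (Python) =====
-- import re
--
-- # leftmost whitespace-delimited token that contains ".js:" or ".ts:"
-- _TOKEN = re.compile(r'\S*\.(?:js|ts):\S*')
--
--
-- def extract_source_location(stack_trace):
--     """Extract file and line number from stack trace (regex-based)"""
--     if not stack_trace:
--         return None, None
--     for line in stack_trace.split('\n'):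
--         if 'src/' not in line:
--             continue
--         m = _TOKEN.search(line)
--         if m:
--             seg = m.group(0).strip('()').split(':')
--             path = seg[0].split('/app/')[-1]
--             return path, seg[1] if len(seg) > 1 else None
--     return None, None
-- ===== Notes on version B (the rewrite author's own statement) =====
-- stated objective: idiomatic
-- what changed: Replaced the nested split-into-parts scan by a single regex search per 'src/' line that finds the leftmost whitespace-delimited token containing '.js:' or '.ts:', then slices path and line number out of it.
import Mathlib
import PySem

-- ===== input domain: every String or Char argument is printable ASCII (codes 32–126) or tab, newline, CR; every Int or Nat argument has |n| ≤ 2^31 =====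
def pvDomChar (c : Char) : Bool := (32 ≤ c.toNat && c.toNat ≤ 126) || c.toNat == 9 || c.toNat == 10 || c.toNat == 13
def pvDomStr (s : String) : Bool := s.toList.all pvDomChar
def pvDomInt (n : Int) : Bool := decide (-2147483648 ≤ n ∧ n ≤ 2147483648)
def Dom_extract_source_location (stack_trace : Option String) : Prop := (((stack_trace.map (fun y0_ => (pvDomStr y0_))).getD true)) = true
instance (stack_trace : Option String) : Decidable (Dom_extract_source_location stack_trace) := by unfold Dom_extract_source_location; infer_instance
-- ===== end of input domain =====

-- B replaces A's nested part-by-part scan with a regex-style leftmost-token search per 'src/' line (idiomatic; same cost).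

-- shared string literals
def pvJs : List Char := ['.', 'j', 's', ':']
def pvTs : List Char := ['.', 't', 's', ':']
def pvSrc : List Char := ['s', 'r', 'c', '/']
def pvAppSrc : List Char := ['/', 'a', 'p', 'p', '/', 's', 'r', 'c', '/']
def pvApp : List Char := ['/', 'a', 'p', 'p', '/']
def pvParens : List Char := ['(', ')']

-- ===== PORT A =====
-- inner loop over parts: first part containing '.js:' or '.ts:' (with the ':' guard) produces the result
def pvPartsA : List (List Char) → Option (Option String × Option String)
  | [] => none
  | p :: rest =>
    if PySem.Chars.isIn pvJs p || PySem.Chars.isIn pvTs p then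
      let fl := PySem.Chars.stripChars p pvParens            -- part.strip('()')
      if PySem.Chars.isIn [':'] fl then
        let segs := PySem.Chars.splitOn fl [':']             -- file_and_line.split(':')
        let fp := segs.headD []                              -- [0]; split never returns []
        let ln := if 1 < segs.length then some (segs.getD 1 []) else none
        let fp2 := if PySem.Chars.isIn pvApp fp then (PySem.Chars.splitOn fp pvApp).getLastD [] else fp
        some (some (String.ofList fp2), ln.map String.ofList)
      else pvPartsA rest
    else pvPartsA rest

-- outer loop over lines
def pvLinesA : List (List Char) → Option String × Option String
  | [] => (none, none)
  | l :: rest =>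
    if PySem.Chars.isIn pvAppSrc l || PySem.Chars.isIn pvSrc l then
      match pvPartsA (PySem.Chars.split₀ (PySem.Chars.strip l)) with   -- line.strip().split()
      | some r => r
      | none => pvLinesA rest
    else pvLinesA rest

def extract_source_location (stack_trace : Option String) : Option String × Option String :=
  match stack_trace with
  | none => (none, none)
  | some s =>
    if s.toList.isEmpty then (none, none)                    -- 'if not stack_trace'
    else pvLinesA (PySem.Chars.splitOn s.toList ['\n'])      -- stack_trace.split('\n')

-- ===== PORT B =====
def pvNonspace (c : Char) : Bool := !PySem.Chars.isspace c

-- the maximal run of non-whitespace characters around position e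
def pvTokenAt (l : List Char) (e : Nat) : List Char :=
  ((l.take e).reverse.takeWhile pvNonspace).reverse ++ (l.drop e).takeWhile pvNonspace

-- hand port of re.search(r'\S*\.(?:js|ts):\S*', line) (exact for this pattern: both markers are
-- whitespace-free, so the leftmost match is the maximal non-whitespace run around the earliest
-- occurrence of '.js:' or '.ts:')
def pvSearchTok (l : List Char) : Option (List Char) :=
  let fj := PySem.Chars.find l pvJs
  let ft := PySem.Chars.find l pvTs
  if fj = -1 then
    if ft = -1 then none else some (pvTokenAt l ft.toNat)
  else if ft = -1 then some (pvTokenAt l fj.toNat)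
  else some (pvTokenAt l (min fj ft).toNat)

-- seg = m.group(0).strip('()').split(':'); (seg[0].split('/app/')[-1], seg[1] if len(seg) > 1 else None)
def pvFinishB (tok : List Char) : Option String × Option String :=
  let seg := PySem.Chars.splitOn (PySem.Chars.stripChars tok pvParens) [':']
  let path := (PySem.Chars.splitOn (seg.headD []) pvApp).getLastD []   -- [-1]; split never returns []
  (some (String.ofList path), if 1 < seg.length then some (String.ofList (seg.getD 1 [])) else none)

def pvLinesB : List (List Char) → Option String × Option String
  | [] => (none, none)
  | l :: rest =>
    if PySem.Chars.isIn pvSrc l then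
      match pvSearchTok l with
      | some tok => pvFinishB tok
      | none => pvLinesB rest
    else pvLinesB rest

def extract_source_location_alt (stack_trace : Option String) : Option String × Option String :=
  match stack_trace with
  | none => (none, none)
  | some s =>
    if s.toList.isEmpty then (none, none)
    else pvLinesB (PySem.Chars.splitOn s.toList ['\n'])

-- ===== PRECONDITION & SPEC =====
def Spec_extract_source_location (stack_trace : Option String) (out : Option String × Option String) : Prop := out = extract_source_location_alt stack_trace
instance (stack_trace : Option String) (out : Option String × Option String) : Decidable (Spec_extract_source_location stack_trace out) := by unfold Spec_extract_source_location; infer_instance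

-- ===== CLAIM (what is proved, stated in full; the proofs are below) =====
def Claim_equal_extract_source_location : Prop := ∀ (stack_trace : Option String), Dom_extract_source_location stack_trace → Spec_extract_source_location stack_trace (extract_source_location stack_trace)

-- ===== LEMMAS AND PROOFS =====

-- words of a line: the maximal non-whitespace runs (proof-side model of str.split())
def pvWords : List Char → List (List Char)
  | [] => []
  | c :: t =>
    if PySem.Chars.isspace c then pvWords t
    else (c :: t.takeWhile pvNonspace) :: pvWords (t.dropWhile pvNonspace)
  termination_by l => l.length
  decreasing_by
  · simp
  · simpa using Nat.lt_succ_of_le (List.length_dropWhile_le _ _)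

theorem pvWords_nil : pvWords [] = [] := by rw [pvWords]

theorem pvWords_cons (c : Char) (t : List Char) :
    pvWords (c :: t) = if PySem.Chars.isspace c then pvWords t
      else (c :: t.takeWhile pvNonspace) :: pvWords (t.dropWhile pvNonspace) := by
  rw [pvWords]

-- the matching predicate of A's inner loop
def pvP (p : List Char) : Bool := PySem.Chars.isIn pvJs p || PySem.Chars.isIn pvTs p

-- a marker occurrence starting at position i
def pvOcc (l : List Char) (i : Nat) : Prop := pvJs <+: l.drop i ∨ pvTs <+: l.drop i

-- the result of A's inner-loop body on a matching part
def pvFinA (p : List Char) : Option String × Option String :=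
  let fl := PySem.Chars.stripChars p pvParens
  let segs := PySem.Chars.splitOn fl [':']
  let fp := segs.headD []
  let ln := if 1 < segs.length then some (segs.getD 1 []) else none
  let fp2 := if PySem.Chars.isIn pvApp fp then (PySem.Chars.splitOn fp pvApp).getLastD [] else fp
  (some (String.ofList fp2), ln.map String.ofList)

-- takeWhile stops at a failing separator
theorem pvTakeWhile_append_stop (p : Char → Bool) (a : List Char) (c : Char) (hc : p c = false)
    (b : List Char) : (a ++ c :: b).takeWhile p = a.takeWhile p := by
  induction a with
  | nil => simp [List.takeWhile_cons, hc]
  | cons d a ih => cases h : p d <;> simp [List.takeWhile_cons, h, ih]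

-- takeWhile passes an all-good block
theorem pvTakeWhile_append_all (p : Char → Bool) (a b : List Char) (ha : ∀ x ∈ a, p x = true) :
    (a ++ b).takeWhile p = a ++ b.takeWhile p := by
  induction a with
  | nil => simp
  | cons d a ih =>
    simp [List.takeWhile_cons, ha d (by simp), ih (fun x hx => ha x (by simp [hx]))]

theorem pvMem_takeWhile (p : Char → Bool) : ∀ (l : List Char) (x : Char),
    x ∈ l.takeWhile p → p x = true := by
  intro l
  induction l with
  | nil => intro x hx; simp at hx
  | cons c t ih =>
    intro x hx
    cases hc : p c with
    | false => rw [List.takeWhile_cons, if_neg (by simp [hc])] at hx; simp at hx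
    | true =>
      rw [List.takeWhile_cons, if_pos (by simp [hc])] at hx
      rcases List.mem_cons.mp hx with rfl | hx
      · exact hc
      · exact ih x hx

theorem pvTakeWhile_append' (p : Char → Bool) : ∀ a b : List Char,
    (a ++ b).takeWhile p = if a.all p then a ++ b.takeWhile p else a.takeWhile p := by
  intro a b
  induction a with
  | nil => simp
  | cons c t ih =>
    cases hc : p c with
    | false => simp [List.takeWhile_cons, hc]
    | true =>
      simp only [List.cons_append, List.takeWhile_cons, hc, if_true, List.all_cons,
        Bool.true_and, ih]
      split <;> simp

theorem pvDropWhile_append' (p : Char → Bool) : ∀ a b : List Char,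
    (a ++ b).dropWhile p = if a.all p then b.dropWhile p else a.dropWhile p ++ b := by
  intro a b
  induction a with
  | nil => simp
  | cons c t ih =>
    cases hc : p c with
    | false => simp [List.dropWhile_cons, hc]
    | true =>
      simp only [List.cons_append, List.dropWhile_cons, hc, if_true, List.all_cons,
        Bool.true_and, ih]

-- a prefix made of good chars stays inside the good block
theorem pvPrefix_split (p : Char → Bool) (sub a b : List Char) (hsub : ∀ x ∈ sub, p x = true)
    (ha : ∀ x ∈ a, p x = true) (hb : b = [] ∨ ∃ d b', b = d :: b' ∧ p d = false)
    (h : sub <+: a ++ b) : sub <+: a := by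
  induction sub generalizing a with
  | nil => simp
  | cons s sub ih =>
    cases a with
    | nil =>
      exfalso
      rcases hb with rfl | ⟨d, b', rfl, hd⟩
      · simp at h
      · rw [List.nil_append, List.cons_prefix_cons] at h
        rw [← h.1] at hd
        simp [hsub s (by simp)] at hd
    | cons x a =>
      rw [List.cons_append, List.cons_prefix_cons] at h
      exact List.cons_prefix_cons.mpr
        ⟨h.1, ih a (fun y hy => hsub y (by simp [hy])) (fun y hy => ha y (by simp [hy])) h.2⟩

theorem pvDropWhile_head (p : Char → Bool) (t : List Char) :
    t.dropWhile p = [] ∨ ∃ d r', t.dropWhile p = d :: r' ∧ p d = false := by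
  induction t with
  | nil => simp
  | cons c t ih =>
    cases h : p c with
    | true => simpa [List.dropWhile_cons, h] using ih
    | false => exact Or.inr ⟨c, t, by simp [List.dropWhile_cons, h], h⟩

-- token extraction lemmas
theorem pvTokenAt_cons_space (c : Char) (t : List Char) (hc : PySem.Chars.isspace c = true)
    (e : Nat) : pvTokenAt (c :: t) (e + 1) = pvTokenAt t e := by
  have hns : pvNonspace c = false := by simp [pvNonspace, hc]
  simp only [pvTokenAt, List.take_succ_cons, List.drop_succ_cons, List.reverse_cons]
  rw [pvTakeWhile_append_stop _ _ _ hns]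

theorem pvTokenAt_in_word (w r : List Char) (hw : ∀ x ∈ w, pvNonspace x = true)
    (hr : r = [] ∨ ∃ d r', r = d :: r' ∧ pvNonspace d = false) (e : Nat) (he : e ≤ w.length) :
    pvTokenAt (w ++ r) e = w := by
  have htw : (w.take e).reverse.takeWhile pvNonspace = (w.take e).reverse :=
    List.takeWhile_eq_self_iff.mpr (fun x hx => hw x (List.mem_of_mem_take (List.mem_reverse.mp hx)))
  have hre : r.takeWhile pvNonspace = [] := by
    rcases hr with rfl | ⟨d, r', rfl, hd⟩
    · rfl
    · simp [List.takeWhile_cons, hd]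
  rw [pvTokenAt, List.take_append_of_le_length he, List.drop_append_of_le_length he, htw,
    List.reverse_reverse, pvTakeWhile_append_all _ _ _ (fun x hx => hw x (List.mem_of_mem_drop hx)),
    hre, List.append_nil]
  exact List.take_append_drop e w

theorem pvTokenAt_skip (w : List Char) (d : Char) (r' : List Char)
    (hd : pvNonspace d = false) (j : Nat) :
    pvTokenAt (w ++ d :: r') (w.length + (j + 1)) = pvTokenAt (d :: r') (j + 1) := by
  have h1 : (w ++ d :: r').take (w.length + (j + 1)) = w ++ (d :: r').take (j + 1) := by
    rw [List.take_append, List.take_of_length_le (by omega), Nat.add_sub_cancel_left]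
  have h2 : (w ++ d :: r').drop (w.length + (j + 1)) = (d :: r').drop (j + 1) :=
    List.drop_length_add_append _
  simp only [pvTokenAt, h1, h2, List.take_succ_cons, List.reverse_append, List.reverse_cons,
    List.append_assoc, List.singleton_append]
  rw [pvTakeWhile_append_stop _ _ _ hd, pvTakeWhile_append_stop _ _ _ hd]

theorem pvJs_nonspace : ∀ x ∈ pvJs, pvNonspace x = true := by
  intro x hx; fin_cases hx <;> rfl
theorem pvTs_nonspace : ∀ x ∈ pvTs, pvNonspace x = true := by
  intro x hx; fin_cases hx <;> rfl

-- occurrence helpers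
theorem pvOcc_nil (i : Nat) : ¬ pvOcc [] i := by
  rintro (⟨u, hu⟩ | ⟨u, hu⟩) <;> simp [pvJs, pvTs] at hu

theorem pvOcc_cons_succ (c : Char) (t : List Char) (i : Nat) :
    pvOcc (c :: t) (i + 1) ↔ pvOcc t i := by
  simp [pvOcc, List.drop_succ_cons]

theorem pvOcc_head (l : List Char) (i : Nat) (h : pvOcc l i) :
    ∃ xs, l.drop i = '.' :: xs := by
  rcases h with ⟨u, hu⟩ | ⟨u, hu⟩
  · exact ⟨'j' :: 's' :: ':' :: u, hu.symm⟩
  · exact ⟨'t' :: 's' :: ':' :: u, hu.symm⟩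

-- occurrences inside / beyond the leading word
theorem pvOcc_append_iff (w r : List Char) (i : Nat) (hi : i ≤ w.length)
    (hw : ∀ x ∈ w, pvNonspace x = true)
    (hr : r = [] ∨ ∃ d r', r = d :: r' ∧ pvNonspace d = false) :
    pvOcc (w ++ r) i ↔ (pvJs <+: w.drop i ∨ pvTs <+: w.drop i) := by
  rw [pvOcc, List.drop_append_of_le_length hi]
  constructor
  · rintro (hp | hp)
    · exact Or.inl (pvPrefix_split pvNonspace pvJs (w.drop i) r pvJs_nonspace
        (fun x hx => hw x (List.mem_of_mem_drop hx)) hr hp)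
    · exact Or.inr (pvPrefix_split pvNonspace pvTs (w.drop i) r pvTs_nonspace
        (fun x hx => hw x (List.mem_of_mem_drop hx)) hr hp)
  · rintro (hp | hp)
    · exact Or.inl (hp.trans (List.prefix_append _ _))
    · exact Or.inr (hp.trans (List.prefix_append _ _))

theorem pvOcc_append_add (w r : List Char) (k : Nat) :
    pvOcc (w ++ r) (w.length + k) ↔ pvOcc r k := by
  rw [pvOcc, pvOcc, List.drop_length_add_append]

theorem pvP_iff_occ (w : List Char) (hw : ∀ x ∈ w, pvNonspace x = true) :
    pvP w = true ↔ ∃ j, j < w.length ∧ (pvJs <+: w.drop j ∨ pvTs <+: w.drop j) := by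
  constructor
  · intro hp
    rw [pvP, Bool.or_eq_true] at hp
    rcases hp with h | h
    · obtain ⟨j, hj⟩ := (PySem.Chars.exists_prefix_drop_iff_isIn pvJs w).mpr h
      refine ⟨j, ?_, Or.inl hj⟩
      by_contra hge
      rw [List.drop_eq_nil_of_le (by omega)] at hj
      simp [pvJs] at hj
    · obtain ⟨j, hj⟩ := (PySem.Chars.exists_prefix_drop_iff_isIn pvTs w).mpr h
      refine ⟨j, ?_, Or.inr hj⟩
      by_contra hge
      rw [List.drop_eq_nil_of_le (by omega)] at hj
      simp [pvTs] at hj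
  · rintro ⟨j, _, hj | hj⟩
    · rw [pvP, Bool.or_eq_true]
      exact Or.inl ((PySem.Chars.exists_prefix_drop_iff_isIn pvJs w).mp ⟨j, hj⟩)
    · rw [pvP, Bool.or_eq_true]
      exact Or.inr ((PySem.Chars.exists_prefix_drop_iff_isIn pvTs w).mp ⟨j, hj⟩)

-- the leading-word facts for a line starting with a non-space character
theorem pvWord_all (c : Char) (t : List Char) (hc : PySem.Chars.isspace c = false) :
    ∀ x ∈ c :: t.takeWhile pvNonspace, pvNonspace x = true := by
  intro x hx
  rcases List.mem_cons.mp hx with rfl | hx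
  · simp [pvNonspace, hc]
  · exact pvMem_takeWhile pvNonspace t x hx

-- the main characterisations: first matching word vs earliest marker occurrence
theorem pvMain_some : ∀ (n : Nat) (l : List Char), l.length ≤ n → ∀ e, pvOcc l e →
    (∀ i, i < e → ¬ pvOcc l i) → (pvWords l).find? pvP = some (pvTokenAt l e) := by
  intro n
  induction n with
  | zero =>
    intro l hl e he _
    have : l = [] := by
      cases l with
      | nil => rfl
      | cons c t => exact absurd hl (by simp)
    subst this
    exact absurd he (pvOcc_nil e)
  | succ n ih =>
    intro l hl e he hmin
    cases l with
    | nil => exact absurd he (pvOcc_nil e)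
    | cons c t =>
      cases hc : PySem.Chars.isspace c with
      | true =>
        have h0 : ¬ pvOcc (c :: t) 0 := by
          intro h
          obtain ⟨xs, hxs⟩ := pvOcc_head _ _ h
          rw [List.drop_zero] at hxs
          rw [List.cons.injEq] at hxs
          rw [hxs.1] at hc
          exact absurd hc (by decide)
        cases e with
        | zero => exact absurd he h0
        | succ e' =>
          rw [pvWords_cons, if_pos (by simp [hc]),
            ih t (by simpa using Nat.le_of_succ_le_succ hl) e' ((pvOcc_cons_succ c t e').mp he)
              (fun i hi => fun hocc => hmin (i + 1) (by omega) ((pvOcc_cons_succ c t i).mpr hocc)),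
            pvTokenAt_cons_space c t hc e']
      | false =>
        have hsplit : c :: t = (c :: t.takeWhile pvNonspace) ++ t.dropWhile pvNonspace := by
          rw [List.cons_append, List.takeWhile_append_dropWhile]
        have hw := pvWord_all c t hc
        have hr := pvDropWhile_head pvNonspace t
        rw [pvWords_cons, if_neg (by simp [hc])]
        by_cases hew : e < (c :: t.takeWhile pvNonspace).length
        · have hPw : pvP (c :: t.takeWhile pvNonspace) = true := by
            rw [pvP_iff_occ _ hw]
            have := he
            rw [hsplit] at this
            exact ⟨e, hew, (pvOcc_append_iff _ _ e (by omega) hw hr).mp this⟩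
          rw [List.find?_cons_of_pos (by simpa using hPw)]
          have : pvTokenAt (c :: t) e = c :: t.takeWhile pvNonspace := by
            rw [hsplit]
            exact pvTokenAt_in_word _ _ hw hr e (by omega)
          rw [this]
        · have hPw : pvP (c :: t.takeWhile pvNonspace) = false := by
            cases hp : pvP (c :: t.takeWhile pvNonspace) with
            | false => rfl
            | true =>
              obtain ⟨j, hj, hjp⟩ := (pvP_iff_occ _ hw).mp hp
              exfalso
              refine hmin j (by omega) ?_
              rw [hsplit]
              exact (pvOcc_append_iff _ _ j (by omega) hw hr).mpr hjp
          rw [List.find?_cons_of_neg (by simpa using hPw)]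
          -- e is beyond the leading word and its separator
          have hnotlen : e ≠ (c :: t.takeWhile pvNonspace).length := by
            intro heq
            have hocc := he
            rw [hsplit, heq] at hocc
            have hocc0 : pvOcc (t.dropWhile pvNonspace) 0 := by
              have h00 := pvOcc_append_add (c :: t.takeWhile pvNonspace) (t.dropWhile pvNonspace) 0
              rw [Nat.add_zero] at h00
              exact h00.mp hocc
            obtain ⟨xs, hxs⟩ := pvOcc_head _ 0 hocc0
            rw [List.drop_zero] at hxs
            rcases hr with hnil | ⟨d, r', hdr, hd⟩
            · rw [hnil] at hxs; cases hxs
            · rw [hdr] at hxs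
              rw [List.cons.injEq] at hxs
              rw [hxs.1] at hd
              exact absurd hd (by decide)
          obtain ⟨k, hk⟩ : ∃ k, e = (c :: t.takeWhile pvNonspace).length + (k + 1) := by
            refine ⟨e - (c :: t.takeWhile pvNonspace).length - 1, ?_⟩
            omega
          have hocc_r : pvOcc (t.dropWhile pvNonspace) (k + 1) := by
            have := he
            rw [hsplit, hk] at this
            exact (pvOcc_append_add _ _ (k + 1)).mp this
          have hmin_r : ∀ i, i < k + 1 → ¬ pvOcc (t.dropWhile pvNonspace) i := by
            intro i hi hocc
            refine hmin ((c :: t.takeWhile pvNonspace).length + i) (by omega) ?_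
            rw [hsplit]
            exact (pvOcc_append_add _ _ i).mpr hocc
          have hlen_r : (t.dropWhile pvNonspace).length ≤ n := by
            have h1 := List.length_dropWhile_le pvNonspace t
            have h2 : t.length ≤ n := by simpa using Nat.le_of_succ_le_succ hl
            omega
          rw [ih _ hlen_r (k + 1) hocc_r hmin_r]
          -- token equality across the leading word
          obtain ⟨d, r', hdr, hd⟩ : ∃ d r', t.dropWhile pvNonspace = d :: r' ∧
              pvNonspace d = false := by
            rcases hr with hnil | h
            · rw [hnil] at hocc_r
              exact absurd hocc_r (pvOcc_nil _)
            · exact h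
          have : pvTokenAt (c :: t) e = pvTokenAt (t.dropWhile pvNonspace) (k + 1) := by
            rw [hsplit, hdr, hk]
            exact pvTokenAt_skip _ d r' hd k
          rw [this]

theorem pvMain_none : ∀ (n : Nat) (l : List Char), l.length ≤ n →
    (∀ i, ¬ pvOcc l i) → (pvWords l).find? pvP = none := by
  intro n
  induction n with
  | zero =>
    intro l hl _
    have : l = [] := by
      cases l with
      | nil => rfl
      | cons c t => exact absurd hl (by simp)
    subst this
    rw [pvWords_nil]; rfl
  | succ n ih =>
    intro l hl hno
    cases l with
    | nil => rw [pvWords_nil]; rfl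
    | cons c t =>
      cases hc : PySem.Chars.isspace c with
      | true =>
        rw [pvWords_cons, if_pos (by simp [hc])]
        exact ih t (by simpa using Nat.le_of_succ_le_succ hl)
          (fun i hocc => hno (i + 1) ((pvOcc_cons_succ c t i).mpr hocc))
      | false =>
        have hsplit : c :: t = (c :: t.takeWhile pvNonspace) ++ t.dropWhile pvNonspace := by
          rw [List.cons_append, List.takeWhile_append_dropWhile]
        have hw := pvWord_all c t hc
        have hr := pvDropWhile_head pvNonspace t
        rw [pvWords_cons, if_neg (by simp [hc])]
        have hPw : pvP (c :: t.takeWhile pvNonspace) = false := by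
          cases hp : pvP (c :: t.takeWhile pvNonspace) with
          | false => rfl
          | true =>
            obtain ⟨j, hj, hjp⟩ := (pvP_iff_occ _ hw).mp hp
            exfalso
            refine hno j ?_
            rw [hsplit]
            exact (pvOcc_append_iff _ _ j (by omega) hw hr).mpr hjp
        rw [List.find?_cons_of_neg (by simpa using hPw)]
        have hlen_r : (t.dropWhile pvNonspace).length ≤ n := by
          have h1 := List.length_dropWhile_le pvNonspace t
          have h2 : t.length ≤ n := by simpa using Nat.le_of_succ_le_succ hl
          omega
        exact ih _ hlen_r (fun i hocc => by
          refine hno ((c :: t.takeWhile pvNonspace).length + i) ?_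
          rw [hsplit]
          exact (pvOcc_append_add _ _ i).mpr hocc)

theorem pvSplit₀_go_eq : ∀ (s cur : List Char) (acc : List (List Char)),
    PySem.Chars.split₀.go s cur acc = acc.reverse ++
      (if cur.isEmpty then pvWords s
       else (cur.reverse ++ s.takeWhile pvNonspace) :: pvWords (s.dropWhile pvNonspace)) := by
  intro s
  induction s with
  | nil =>
    intro cur acc
    cases cur <;> simp [PySem.Chars.split₀.go, pvWords_nil]
  | cons c t ih =>
    intro cur acc
    rw [PySem.Chars.split₀.go]
    cases hc : PySem.Chars.isspace c with
    | false =>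
      have hns : pvNonspace c = true := by simp [pvNonspace, hc]
      rw [if_neg (by simp [hc]), ih (c :: cur) acc]
      cases cur <;>
        simp [List.takeWhile_cons, List.dropWhile_cons, hns, hc, pvWords_cons]
    | true =>
      have hns : pvNonspace c = false := by simp [pvNonspace, hc]
      rw [if_pos (by simp [hc])]
      cases cur with
      | nil =>
        rw [if_pos (show ([] : List Char).isEmpty = true from rfl), ih [] acc]
        simp [pvWords_cons, hc]
      | cons k ks =>
        rw [if_neg (by simp), ih [] ((k :: ks).reverse :: acc)]
        simp [pvWords_cons, hc, List.takeWhile_cons, List.dropWhile_cons, hns]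

theorem pvSplit₀_eq_words : ∀ s : List Char, PySem.Chars.split₀ s = pvWords s := by
  intro s
  rw [PySem.Chars.split₀, pvSplit₀_go_eq]
  rfl

-- stripping does not change the words
theorem pvWords_dropWhile (s : List Char) :
    pvWords (s.dropWhile PySem.Chars.isspace) = pvWords s := by
  induction s with
  | nil => rfl
  | cons c t ih =>
    cases hc : PySem.Chars.isspace c with
    | true => rw [List.dropWhile_cons, if_pos (by simp [hc]), ih, pvWords_cons, if_pos (by simp [hc])]
    | false => rw [List.dropWhile_cons, if_neg (by simp [hc])]

theorem pvWords_allspace : ∀ tr : List Char, (∀ x ∈ tr, PySem.Chars.isspace x = true) →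
    pvWords tr = [] := by
  intro tr
  induction tr with
  | nil => intro _; exact pvWords_nil
  | cons c t ih =>
    intro h
    rw [pvWords_cons, if_pos (by simp [h c (by simp)])]
    exact ih (fun x hx => h x (by simp [hx]))

theorem pvTakeWhile_nonspace_allspace (tr : List Char)
    (h : ∀ x ∈ tr, PySem.Chars.isspace x = true) : tr.takeWhile pvNonspace = [] := by
  cases tr with
  | nil => rfl
  | cons c t => rw [List.takeWhile_cons, if_neg (by simp [pvNonspace, h c (by simp)])]

theorem pvDropWhile_nonspace_allspace (tr : List Char)
    (h : ∀ x ∈ tr, PySem.Chars.isspace x = true) : tr.dropWhile pvNonspace = tr := by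
  cases tr with
  | nil => rfl
  | cons c t => rw [List.dropWhile_cons, if_neg (by simp [pvNonspace, h c (by simp)])]

theorem pvWords_append_trailing : ∀ (n : Nat) (a : List Char), a.length ≤ n →
    ∀ tr : List Char, (∀ x ∈ tr, PySem.Chars.isspace x = true) →
    pvWords (a ++ tr) = pvWords a := by
  intro n
  induction n with
  | zero =>
    intro a ha tr htr
    have : a = [] := by
      cases a with
      | nil => rfl
      | cons c t => exact absurd ha (by simp)
    subst this
    rw [List.nil_append, pvWords_allspace tr htr, pvWords_nil]
  | succ n ih =>
    intro a ha tr htr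
    cases a with
    | nil => rw [List.nil_append, pvWords_allspace tr htr, pvWords_nil]
    | cons c t =>
      rw [List.cons_append, pvWords_cons, pvWords_cons]
      cases hc : PySem.Chars.isspace c with
      | true =>
        rw [if_pos (by simp [hc]), if_pos (by simp [hc])]
        exact ih t (by simpa using Nat.le_of_succ_le_succ ha) tr htr
      | false =>
        rw [if_neg (by simp [hc]), if_neg (by simp [hc]), pvTakeWhile_append' pvNonspace t tr,
          pvDropWhile_append' pvNonspace t tr]
        cases hall : t.all pvNonspace with
        | true =>
          rw [if_pos (by simp [hall]), if_pos (by simp [hall]),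
            pvTakeWhile_nonspace_allspace tr htr, pvDropWhile_nonspace_allspace tr htr,
            pvWords_allspace tr htr, List.append_nil]
          have hdt : t.dropWhile pvNonspace = [] := by
            rw [List.dropWhile_eq_nil_iff]
            intro x hx
            exact List.all_eq_true.mp hall x hx
          rw [hdt, pvWords_nil]
          have htt : t.takeWhile pvNonspace = t :=
            List.takeWhile_eq_self_iff.mpr (List.all_eq_true.mp hall)
          rw [htt]
        | false =>
          rw [if_neg (by simp [hall]), if_neg (by simp [hall])]
          have hlen : (t.dropWhile pvNonspace).length ≤ n := by
            have h1 := List.length_dropWhile_le pvNonspace t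
            have h2 : t.length ≤ n := by simpa using Nat.le_of_succ_le_succ ha
            omega
          rw [ih (t.dropWhile pvNonspace) hlen tr htr]

theorem pvWords_strip (s : List Char) : pvWords (PySem.Chars.strip s) = pvWords s := by
  rw [PySem.Chars.strip, PySem.Chars.lstrip, PySem.Chars.rstrip]
  have hx := pvWords_dropWhile s
  set x := s.dropWhile PySem.Chars.isspace with hxdef
  have hdecomp : x = (x.reverse.dropWhile PySem.Chars.isspace).reverse ++
      (x.reverse.takeWhile PySem.Chars.isspace).reverse := by
    conv_lhs => rw [← List.reverse_reverse x,
      ← List.takeWhile_append_dropWhile (p := PySem.Chars.isspace) (l := x.reverse)]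
    rw [List.reverse_append]
  have htr : ∀ c ∈ (x.reverse.takeWhile PySem.Chars.isspace).reverse,
      PySem.Chars.isspace c = true := by
    intro c hc
    exact pvMem_takeWhile PySem.Chars.isspace x.reverse c (List.mem_reverse.mp hc)
  calc pvWords (x.reverse.dropWhile PySem.Chars.isspace).reverse
      = pvWords ((x.reverse.dropWhile PySem.Chars.isspace).reverse ++
          (x.reverse.takeWhile PySem.Chars.isspace).reverse) :=
        (pvWords_append_trailing _ _ le_rfl _ htr).symm
    _ = pvWords x := by rw [← hdecomp]
    _ = pvWords s := hx

-- infix survives dropWhile/stripChars when it contains none of the dropped chars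
theorem pvInfix_dropWhile (p : Char → Bool) (sub : List Char) (hsub : ∀ x ∈ sub, p x = false)
    (hne : sub ≠ []) : ∀ s : List Char, sub <:+: s → sub <:+: s.dropWhile p := by
  intro s
  induction s with
  | nil => intro h; exact absurd (List.infix_nil.mp h) hne
  | cons c t ih =>
    intro h
    cases hc : p c with
    | false => simpa [List.dropWhile_cons, hc] using h
    | true =>
      rw [List.dropWhile_cons, if_pos hc]
      rcases List.infix_cons_iff.mp h with hpre | hinf
      · cases sub with
        | nil => exact absurd rfl hne
        | cons x xs =>
          rw [List.cons_prefix_cons] at hpre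
          have hx := hsub x (by simp)
          rw [hpre.1] at hx; rw [hx] at hc; cases hc
      · exact ih hinf

theorem pvInfix_stripChars (sub s chars : List Char) (hsub : ∀ x ∈ sub, chars.contains x = false)
    (hne : sub ≠ []) (h : sub <:+: s) : sub <:+: PySem.Chars.stripChars s chars := by
  have h1 := pvInfix_dropWhile (fun c => chars.contains c) sub hsub hne s h
  have h2 : sub.reverse <:+: (s.dropWhile (fun c => chars.contains c)).reverse :=
    List.reverse_infix.mpr h1
  have h3 := pvInfix_dropWhile (fun c => chars.contains c) sub.reverse
    (fun x hx => hsub x (List.mem_reverse.mp hx)) (by simpa using hne) _ h2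
  have h4 := List.reverse_infix.mpr h3
  rw [List.reverse_reverse] at h4
  exact h4

-- A's ':' guard always fires on a matching part
theorem pvNoParens_js : ∀ x ∈ pvJs, pvParens.contains x = false := by
  intro x hx; fin_cases hx <;> rfl
theorem pvNoParens_ts : ∀ x ∈ pvTs, pvParens.contains x = false := by
  intro x hx; fin_cases hx <;> rfl

theorem pvColon (p : List Char) (hp : pvP p = true) :
    PySem.Chars.isIn [':'] (PySem.Chars.stripChars p pvParens) = true := by
  rw [pvP, Bool.or_eq_true] at hp
  apply (PySem.Chars.isIn_iff_infix _ _).mpr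
  rcases hp with h | h
  · have hinf := (PySem.Chars.isIn_iff_infix _ _).mp h
    have hs := pvInfix_stripChars pvJs p pvParens pvNoParens_js (by decide) hinf
    exact List.IsInfix.trans (⟨['.', 'j', 's'], [], rfl⟩ : [':'] <:+: pvJs) hs
  · have hinf := (PySem.Chars.isIn_iff_infix _ _).mp h
    have hs := pvInfix_stripChars pvTs p pvParens pvNoParens_ts (by decide) hinf
    exact List.IsInfix.trans (⟨['.', 't', 's'], [], rfl⟩ : [':'] <:+: pvTs) hs

-- split on a separator that does not occur
theorem pvSplitOn_go_eq (sub : List Char) : ∀ (fuel : Nat) (l cur : List Char)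
    (acc : List (List Char)), (∀ j, sub.isPrefixOf (l.drop j) = false) →
    PySem.Chars.splitOn.go sub fuel l cur acc = ((cur.reverse ++ l) :: acc).reverse := by
  intro fuel
  induction fuel with
  | zero => intro l cur acc _; rfl
  | succ fuel ih =>
    intro l cur acc hl
    cases l with
    | nil => simp [PySem.Chars.splitOn.go]
    | cons c rest =>
      have h0 := hl 0
      rw [List.drop_zero] at h0
      rw [PySem.Chars.splitOn.go, if_neg (by simp [h0])]
      rw [ih rest (c :: cur) acc (fun j => hl (j + 1))]
      simp

theorem pvSplitOn_not_in (s sub : List Char) (hne : sub ≠ [])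
    (h : PySem.Chars.isIn sub s = false) : PySem.Chars.splitOn s sub = [s] := by
  have hpre : ∀ j, sub.isPrefixOf (s.drop j) = false := by
    intro j
    cases hI : sub.isPrefixOf (s.drop j) with
    | false => rfl
    | true =>
      have := (PySem.Chars.exists_prefix_drop_iff_isIn sub s).mp
        ⟨j, List.isPrefixOf_iff_prefix.mp hI⟩
      rw [this] at h; cases h
  rw [PySem.Chars.splitOn, pvSplitOn_go_eq sub _ s [] [] hpre]
  rfl

-- A's inner loop = find? + finish
theorem pvPartsA_eq_find? (ws : List (List Char)) :
    pvPartsA ws = (ws.find? pvP).map pvFinA := by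
  induction ws with
  | nil => rfl
  | cons p rest ih =>
    rw [pvPartsA]
    cases hp : (PySem.Chars.isIn pvJs p || PySem.Chars.isIn pvTs p) with
    | false =>
      rw [if_neg (by simp [hp]), List.find?_cons_of_neg (by simp [pvP, hp]), ih]
    | true =>
      have hc := pvColon p (by simp [pvP, hp])
      rw [if_pos (by simp [hp]), if_pos (by simp [hc]), List.find?_cons_of_pos (by simp [pvP, hp])]
      rfl

theorem pvFinA_eq_finishB (p : List Char) : pvFinA p = pvFinishB p := by
  simp only [pvFinA, pvFinishB]
  congr 1
  · cases happ : PySem.Chars.isIn pvApp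
      ((PySem.Chars.splitOn (PySem.Chars.stripChars p pvParens) [':']).headD []) with
    | true => rw [if_pos (by simp [happ])]
    | false =>
      rw [if_neg (by simp [happ]), pvSplitOn_not_in _ pvApp (by decide) happ]
      rfl
  · cases hlen : decide
      (1 < (PySem.Chars.splitOn (PySem.Chars.stripChars p pvParens) [':']).length) with
    | true => rw [if_pos (by simpa using hlen), if_pos (by simpa using hlen)]; rfl
    | false => rw [if_neg (by simpa using hlen), if_neg (by simpa using hlen)]; rfl

-- bridging pvSearchTok with minimal occurrences
theorem pvFindMin (l sub : List Char) (i : Nat) (hp : sub <+: l.drop i) :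
    PySem.Chars.find l sub ≠ -1 ∧ (PySem.Chars.find l sub).toNat ≤ i := by
  have hin : PySem.Chars.isIn sub l = true :=
    (PySem.Chars.exists_prefix_drop_iff_isIn sub l).mp ⟨i, hp⟩
  have hinf := (PySem.Chars.isIn_iff_infix _ _).mp hin
  have hne : PySem.Chars.find l sub ≠ -1 := fun hc =>
    ((PySem.Chars.find_eq_neg_one_iff l sub).mp hc) hinf
  have h0 : 0 ≤ PySem.Chars.find l sub := by
    have := PySem.Chars.neg_one_le_find l sub; omega
  refine ⟨hne, ?_⟩
  by_contra hlt
  exact (PySem.Chars.find_spec h0).2 i (by omega) hp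

theorem pvFindOcc (l sub : List Char) (h : PySem.Chars.find l sub ≠ -1) :
    sub <+: l.drop (PySem.Chars.find l sub).toNat := by
  have h0 : 0 ≤ PySem.Chars.find l sub := by
    have := PySem.Chars.neg_one_le_find l sub; omega
  exact (PySem.Chars.find_spec h0).1

theorem pvSearchTok_none (l : List Char) (h : pvSearchTok l = none) : ∀ i, ¬ pvOcc l i := by
  intro i hocc
  rw [pvSearchTok] at h
  by_cases hj : PySem.Chars.find l pvJs = -1
  · by_cases ht : PySem.Chars.find l pvTs = -1
    · rcases hocc with hp | hp
      · exact (pvFindMin l pvJs i hp).1 hj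
      · exact (pvFindMin l pvTs i hp).1 ht
    · rw [if_pos hj, if_neg ht] at h; cases h
  · rw [if_neg hj] at h
    by_cases ht : PySem.Chars.find l pvTs = -1
    · rw [if_pos ht] at h; cases h
    · rw [if_neg ht] at h; cases h

theorem pvSearchTok_some (l : List Char) (tok : List Char) (h : pvSearchTok l = some tok) :
    ∃ e, pvOcc l e ∧ (∀ i, i < e → ¬ pvOcc l i) ∧ tok = pvTokenAt l e := by
  rw [pvSearchTok] at h
  by_cases hj : PySem.Chars.find l pvJs = -1
  · rw [if_pos hj] at h
    by_cases ht : PySem.Chars.find l pvTs = -1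
    · rw [if_pos ht] at h; cases h
    · rw [if_neg ht] at h
      refine ⟨(PySem.Chars.find l pvTs).toNat, Or.inr (pvFindOcc l pvTs ht), ?_, by
        cases h; rfl⟩
      intro i hi hocc
      rcases hocc with hp | hp
      · exact (pvFindMin l pvJs i hp).1 hj
      · exact absurd (pvFindMin l pvTs i hp).2 (by omega)
  · rw [if_neg hj] at h
    by_cases ht : PySem.Chars.find l pvTs = -1
    · rw [if_pos ht] at h
      refine ⟨(PySem.Chars.find l pvJs).toNat, Or.inl (pvFindOcc l pvJs hj), ?_, by
        cases h; rfl⟩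
      intro i hi hocc
      rcases hocc with hp | hp
      · exact absurd (pvFindMin l pvJs i hp).2 (by omega)
      · exact (pvFindMin l pvTs i hp).1 ht
    · rw [if_neg ht] at h
      have hj0 : 0 ≤ PySem.Chars.find l pvJs := by
        have := PySem.Chars.neg_one_le_find l pvJs; omega
      have ht0 : 0 ≤ PySem.Chars.find l pvTs := by
        have := PySem.Chars.neg_one_le_find l pvTs; omega
      refine ⟨(min (PySem.Chars.find l pvJs) (PySem.Chars.find l pvTs)).toNat, ?_, ?_, by
        cases h; rfl⟩
      · rcases le_total (PySem.Chars.find l pvJs) (PySem.Chars.find l pvTs) with hle | hle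
        · rw [min_eq_left hle]; exact Or.inl (pvFindOcc l pvJs hj)
        · rw [min_eq_right hle]; exact Or.inr (pvFindOcc l pvTs ht)
      · intro i hi hocc
        rcases hocc with hp | hp
        · have h2 := (pvFindMin l pvJs i hp).2
          have : (min (PySem.Chars.find l pvJs) (PySem.Chars.find l pvTs)).toNat ≤
              (PySem.Chars.find l pvJs).toNat := Int.toNat_le_toNat (min_le_left _ _)
          omega
        · have h2 := (pvFindMin l pvTs i hp).2
          have : (min (PySem.Chars.find l pvJs) (PySem.Chars.find l pvTs)).toNat ≤
              (PySem.Chars.find l pvTs).toNat := Int.toNat_le_toNat (min_le_right _ _)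
          omega

-- per-line equality
theorem pvLine (l : List Char) :
    pvPartsA (PySem.Chars.split₀ (PySem.Chars.strip l)) = (pvSearchTok l).map pvFinishB := by
  rw [pvPartsA_eq_find?, pvSplit₀_eq_words, pvWords_strip]
  cases h : pvSearchTok l with
  | none => rw [pvMain_none l.length l le_rfl (pvSearchTok_none l h)]; rfl
  | some tok =>
    obtain ⟨e, h1, h2, h3⟩ := pvSearchTok_some l tok h
    rw [pvMain_some l.length l le_rfl e h1 h2, h3]
    simp [pvFinA_eq_finishB]

-- gating equality
theorem pvGate (l : List Char) :
    (PySem.Chars.isIn pvAppSrc l || PySem.Chars.isIn pvSrc l) = PySem.Chars.isIn pvSrc l := by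
  cases h : PySem.Chars.isIn pvSrc l with
  | true => simp [h]
  | false =>
    have happ : PySem.Chars.isIn pvAppSrc l = false := by
      cases h2 : PySem.Chars.isIn pvAppSrc l with
      | false => rfl
      | true =>
        have hinf := (PySem.Chars.isIn_iff_infix _ _).mp h2
        have hsrc : pvSrc <:+: pvAppSrc := ⟨['/', 'a', 'p', 'p', '/'], [], rfl⟩
        have := (PySem.Chars.isIn_iff_infix _ _).mpr (hsrc.trans hinf)
        rw [this] at h; cases h
    simp [h, happ]

theorem pvLines_eq (ls : List (List Char)) : pvLinesA ls = pvLinesB ls := by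
  induction ls with
  | nil => rfl
  | cons l rest ih =>
    rw [pvLinesA, pvLinesB, pvGate, pvLine]
    cases pvSearchTok l <;> simp [ih]

-- ===== VERDICT (by name: the statement is the Claim_ definition above) =====
theorem extract_source_location_spec : Claim_equal_extract_source_location := by
  intro st _
  unfold Spec_extract_source_location extract_source_location extract_source_location_alt
  cases st with
  | none => rfl
  | some s =>
    simp only []
    split
    · rfl
    · exact pvLines_eq _
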